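-- pv_equiv track=rewrite | github.com/Silverhorse7/IPC | Scrappers/uva/problems.py | extract_problem_text_sample_input_output
-- ===== SOURCE A (Python) =====
-- def extract_problem_text_sample_input_output(problem_content):
--     def read_section(start_index, end_keyword):
--         section = ""
--         index = start_index
--         lines = problem_content.splitlines()
--
--         while index < len(lines):
--             line = lines[index]
--
--             if "Universidad de Valladolid OJ" in line:
--                 index += 2
--                 continue
--
--             if end_keyword is not None and end_keyword in line:
--                 index += 1
--                 break
--
--             section += line + "\n"
--             index += 1
--
--         return section.strip(), index
--
--     problem_text, index = read_section(2, "Sample Input")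
--     sample_input, index = read_section(index, "Sample Output")
--     sample_output, _ = read_section(index, None)
--
--     return problem_text, sample_input, sample_output
-- ===== SOURCE B (Python) =====
-- def extract_problem_text_sample_input_output(problem_content):
--     lines = problem_content.splitlines()
--     buffers = ([], [], [])
--     end_keywords = ("Sample Input", "Sample Output", None)
--     state = 0
--     i = 2
--     n = len(lines)
--     while i < n:
--         line = lines[i]
--         if "Universidad de Valladolid OJ" in line:
--             i += 2
--             continue
--         keyword = end_keywords[state]
--         if keyword is not None and keyword in line:
--             state += 1
--             i += 1
--             continue
--         buffers[state].append(line)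
--         i += 1
--     problem_text, sample_input, sample_output = ("\n".join(b).strip() for b in buffers)
--     return problem_text, sample_input, sample_output
-- ===== Notes on version B (the rewrite author's own statement) =====
-- stated objective: alternative
-- what changed: Replaces A's three sequential read_section passes (each re-splitting the content and returning a resume index) with a single loop over the lines split once, driven by a state variable 0/1/2 that selects the end-keyword and one of three line buffers, joined and stripped at the end instead of string concatenation per line.
import Mathlib
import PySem

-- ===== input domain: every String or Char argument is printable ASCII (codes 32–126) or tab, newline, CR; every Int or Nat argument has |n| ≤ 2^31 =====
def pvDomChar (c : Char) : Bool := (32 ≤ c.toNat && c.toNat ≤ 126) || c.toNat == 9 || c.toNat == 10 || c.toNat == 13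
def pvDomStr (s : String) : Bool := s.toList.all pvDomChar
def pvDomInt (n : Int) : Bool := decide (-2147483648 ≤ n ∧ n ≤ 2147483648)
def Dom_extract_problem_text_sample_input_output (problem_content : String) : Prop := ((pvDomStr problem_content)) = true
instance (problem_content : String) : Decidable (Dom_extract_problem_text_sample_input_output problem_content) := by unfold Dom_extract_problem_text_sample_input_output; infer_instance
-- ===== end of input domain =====

-- B replaces A's three read_section passes by one state-driven loop over the lines with three buffers (alternative decomposition, same result).

-- ===== PORT A =====
-- read_section: the accumulated string 'section' is ported as its List Char; 'section += line + "\n"' is list append (exact).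
-- fuel is a totality guard only: every iteration advances index by at least 1, so fuel = lines.length always suffices.
def pvReadA (lines : List String) : Nat → Nat → Option String → List Char → String × Nat
  | 0, index, _, sec => (String.ofList (PySem.Chars.strip sec), index)
  | fuel + 1, index, endKeyword, sec =>
    if h : index < lines.length then
      let line := lines[index]
      if PySem.Str.isIn "Universidad de Valladolid OJ" line then
        pvReadA lines fuel (index + 2) endKeyword sec
      else
        match endKeyword with
        | some kw =>
          if PySem.Str.isIn kw line then (String.ofList (PySem.Chars.strip sec), index + 1)
          else pvReadA lines fuel (index + 1) endKeyword (sec ++ line.toList ++ ['\n'])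
        | none => pvReadA lines fuel (index + 1) none (sec ++ line.toList ++ ['\n'])
    else (String.ofList (PySem.Chars.strip sec), index)

def extract_problem_text_sample_input_output (problem_content : String) : String × String × String :=
  let lines := PySem.Str.splitlines problem_content
  let r1 := pvReadA lines lines.length 2 (some "Sample Input") []
  let r2 := pvReadA lines lines.length r1.2 (some "Sample Output") []
  let r3 := pvReadA lines lines.length r2.2 none []
  (r1.1, r2.1, r3.1)

-- ===== PORT B =====
-- end_keywords[state]
def pvKwB (state : Nat) : Option String :=
  if state = 0 then some "Sample Input" else if state = 1 then some "Sample Output" else none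

-- the single while loop of B: buffers[state].append(line) is written out per state; fuel as above
def pvScanB (lines : List String) : Nat → Nat → Nat → List String → List String → List String →
    List String × List String × List String
  | 0, _, _, b0, b1, b2 => (b0, b1, b2)
  | fuel + 1, i, state, b0, b1, b2 =>
    if h : i < lines.length then
      let line := lines[i]
      if PySem.Str.isIn "Universidad de Valladolid OJ" line then
        pvScanB lines fuel (i + 2) state b0 b1 b2
      else
        match pvKwB state with
        | some kw =>
          if PySem.Str.isIn kw line then pvScanB lines fuel (i + 1) (state + 1) b0 b1 b2
          else if state = 0 then pvScanB lines fuel (i + 1) state (b0 ++ [line]) b1 b2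
          else pvScanB lines fuel (i + 1) state b0 (b1 ++ [line]) b2
        | none => pvScanB lines fuel (i + 1) state b0 b1 (b2 ++ [line])
    else (b0, b1, b2)

-- "\n".join(b).strip()
def pvStripJoinB (b : List String) : String := PySem.Str.strip (PySem.Str.join "\n" b)

def extract_problem_text_sample_input_output_alt (problem_content : String) : String × String × String :=
  let lines := PySem.Str.splitlines problem_content
  let r := pvScanB lines lines.length 2 0 [] [] []
  (pvStripJoinB r.1, pvStripJoinB r.2.1, pvStripJoinB r.2.2)

-- ===== PRECONDITION & SPEC =====
def Spec_extract_problem_text_sample_input_output (problem_content : String) (out : String × String × String) : Prop := out = extract_problem_text_sample_input_output_alt problem_content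
instance (problem_content : String) (out : String × String × String) : Decidable (Spec_extract_problem_text_sample_input_output problem_content out) := by unfold Spec_extract_problem_text_sample_input_output; infer_instance

-- ===== CLAIM (what is proved, stated in full; the proofs are below) =====
def Claim_equal_extract_problem_text_sample_input_output : Prop := ∀ (problem_content : String), Dom_extract_problem_text_sample_input_output problem_content → Spec_extract_problem_text_sample_input_output problem_content (extract_problem_text_sample_input_output problem_content)

-- ===== LEMMAS AND PROOFS =====

-- character content of a B buffer, seen as A accumulates it: each line followed by '\n'
def pvBufChars (b : List String) : List Char := (b.map (fun l => l.toList ++ ['\n'])).flatten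

lemma pvBufChars_append (b : List String) (l : String) :
    pvBufChars (b ++ [l]) = pvBufChars b ++ l.toList ++ ['\n'] := by
  simp [pvBufChars]

lemma pv_rstrip_newline (ys : List Char) :
    PySem.Chars.rstrip (ys ++ ['\n']) = PySem.Chars.rstrip ys := by
  have hsp : PySem.Chars.isspace '\n' = true := by decide
  simp [PySem.Chars.rstrip, hsp]

lemma pv_strip_newline (xs : List Char) :
    PySem.Chars.strip (xs ++ ['\n']) = PySem.Chars.strip xs := by
  have hsp : PySem.Chars.isspace '\n' = true := by decide
  have hnl : List.dropWhile PySem.Chars.isspace ['\n'] = [] := by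
    simp [hsp]
  simp only [PySem.Chars.strip, PySem.Chars.lstrip, List.dropWhile_append]
  split_ifs with h
  · have h' := List.isEmpty_iff.mp h
    simp [hnl, h']
  · exact pv_rstrip_newline _

lemma pv_intercalate_cons_cons (s a b : List Char) (t : List (List Char)) :
    List.intercalate s (a :: b :: t) = a ++ s ++ List.intercalate s (b :: t) := by
  simp [List.intercalate, List.intersperse, List.append_assoc]

lemma pvBufChars_eq_intercalate (b : List String) (hb : b ≠ []) :
    pvBufChars b = List.intercalate ['\n'] (b.map String.toList) ++ ['\n'] := by
  induction b with
  | nil => simp at hb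
  | cons x t ih =>
    cases t with
    | nil => simp [pvBufChars, List.intercalate]
    | cons y s =>
      simp only [pvBufChars, List.map_cons, List.flatten_cons] at *
      rw [ih (by simp), pv_intercalate_cons_cons]
      simp [List.append_assoc]

lemma pvStripJoinB_eq (b : List String) :
    pvStripJoinB b = String.ofList (PySem.Chars.strip (pvBufChars b)) := by
  cases b with
  | nil =>
    simp [pvStripJoinB, pvBufChars, PySem.Str.strip, PySem.Str.join, PySem.Chars.join,
      List.intercalate]
  | cons x t =>
    rw [pvBufChars_eq_intercalate _ (by simp), pv_strip_newline]
    have hn : "\n".toList = ['\n'] := rfl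
    simp [pvStripJoinB, PySem.Str.strip, PySem.Str.join, PySem.Chars.join, hn]

-- small-step characterisations of the two loops
lemma pvReadA_done {lines : List String} {i : Nat} {kw : Option String} {sec : List Char}
    (fuel : Nat) (hi : ¬ i < lines.length) :
    pvReadA lines fuel i kw sec = (String.ofList (PySem.Chars.strip sec), i) := by
  cases fuel with
  | zero => rfl
  | succ f => rw [pvReadA, dif_neg hi]

lemma pvReadA_oj {lines : List String} {m i : Nat} {kw : Option String} {sec : List Char}
    (hi : i < lines.length)
    (hoj : PySem.Str.isIn "Universidad de Valladolid OJ" (lines[i]'hi) = true) :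
    pvReadA lines (m + 1) i kw sec = pvReadA lines m (i + 2) kw sec := by
  rw [pvReadA, dif_pos hi]; dsimp only; rw [if_pos hoj]

lemma pvReadA_kw {lines : List String} {m i : Nat} {kw : String} {sec : List Char}
    (hi : i < lines.length)
    (hoj : ¬ PySem.Str.isIn "Universidad de Valladolid OJ" (lines[i]'hi) = true)
    (hkw : PySem.Str.isIn kw (lines[i]'hi) = true) :
    pvReadA lines (m + 1) i (some kw) sec = (String.ofList (PySem.Chars.strip sec), i + 1) := by
  rw [pvReadA, dif_pos hi]; dsimp only; rw [if_neg hoj, if_pos hkw]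

lemma pvReadA_app_some {lines : List String} {m i : Nat} {kw : String} {sec : List Char}
    (hi : i < lines.length)
    (hoj : ¬ PySem.Str.isIn "Universidad de Valladolid OJ" (lines[i]'hi) = true)
    (hkw : ¬ PySem.Str.isIn kw (lines[i]'hi) = true) :
    pvReadA lines (m + 1) i (some kw) sec =
      pvReadA lines m (i + 1) (some kw) (sec ++ (lines[i]'hi).toList ++ ['\n']) := by
  rw [pvReadA, dif_pos hi]; dsimp only; rw [if_neg hoj, if_neg hkw]

lemma pvReadA_app_none {lines : List String} {m i : Nat} {sec : List Char}
    (hi : i < lines.length)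
    (hoj : ¬ PySem.Str.isIn "Universidad de Valladolid OJ" (lines[i]'hi) = true) :
    pvReadA lines (m + 1) i none sec =
      pvReadA lines m (i + 1) none (sec ++ (lines[i]'hi).toList ++ ['\n']) := by
  rw [pvReadA, dif_pos hi]; dsimp only; rw [if_neg hoj]

lemma pvScanB_done {lines : List String} {i st : Nat} {b0 b1 b2 : List String}
    (fuel : Nat) (hi : ¬ i < lines.length) :
    pvScanB lines fuel i st b0 b1 b2 = (b0, b1, b2) := by
  cases fuel with
  | zero => rfl
  | succ f => rw [pvScanB, dif_neg hi]

lemma pvScanB_oj {lines : List String} {n i st : Nat} {b0 b1 b2 : List String}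
    (hi : i < lines.length)
    (hoj : PySem.Str.isIn "Universidad de Valladolid OJ" (lines[i]'hi) = true) :
    pvScanB lines (n + 1) i st b0 b1 b2 = pvScanB lines n (i + 2) st b0 b1 b2 := by
  rw [pvScanB, dif_pos hi]; dsimp only; rw [if_pos hoj]

lemma pvScanB_kw0 {lines : List String} {n i : Nat} {b0 b1 b2 : List String}
    (hi : i < lines.length)
    (hoj : ¬ PySem.Str.isIn "Universidad de Valladolid OJ" (lines[i]'hi) = true)
    (hkw : PySem.Str.isIn "Sample Input" (lines[i]'hi) = true) :
    pvScanB lines (n + 1) i 0 b0 b1 b2 = pvScanB lines n (i + 1) 1 b0 b1 b2 := by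
  rw [pvScanB, dif_pos hi]; dsimp only
  rw [if_neg hoj, show pvKwB 0 = some "Sample Input" from rfl]
  dsimp only
  rw [if_pos hkw]

lemma pvScanB_kw1 {lines : List String} {n i : Nat} {b0 b1 b2 : List String}
    (hi : i < lines.length)
    (hoj : ¬ PySem.Str.isIn "Universidad de Valladolid OJ" (lines[i]'hi) = true)
    (hkw : PySem.Str.isIn "Sample Output" (lines[i]'hi) = true) :
    pvScanB lines (n + 1) i 1 b0 b1 b2 = pvScanB lines n (i + 1) 2 b0 b1 b2 := by
  rw [pvScanB, dif_pos hi]; dsimp only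
  rw [if_neg hoj, show pvKwB 1 = some "Sample Output" from rfl]
  dsimp only
  rw [if_pos hkw]

lemma pvScanB_app0 {lines : List String} {n i : Nat} {b0 b1 b2 : List String}
    (hi : i < lines.length)
    (hoj : ¬ PySem.Str.isIn "Universidad de Valladolid OJ" (lines[i]'hi) = true)
    (hkw : ¬ PySem.Str.isIn "Sample Input" (lines[i]'hi) = true) :
    pvScanB lines (n + 1) i 0 b0 b1 b2 = pvScanB lines n (i + 1) 0 (b0 ++ [lines[i]'hi]) b1 b2 := by
  rw [pvScanB, dif_pos hi]; dsimp only
  rw [if_neg hoj, show pvKwB 0 = some "Sample Input" from rfl]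
  dsimp only
  rw [if_neg hkw, if_pos rfl]

lemma pvScanB_app1 {lines : List String} {n i : Nat} {b0 b1 b2 : List String}
    (hi : i < lines.length)
    (hoj : ¬ PySem.Str.isIn "Universidad de Valladolid OJ" (lines[i]'hi) = true)
    (hkw : ¬ PySem.Str.isIn "Sample Output" (lines[i]'hi) = true) :
    pvScanB lines (n + 1) i 1 b0 b1 b2 = pvScanB lines n (i + 1) 1 b0 (b1 ++ [lines[i]'hi]) b2 := by
  rw [pvScanB, dif_pos hi]; dsimp only
  rw [if_neg hoj, show pvKwB 1 = some "Sample Output" from rfl]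
  dsimp only
  rw [if_neg hkw, if_neg Nat.one_ne_zero]

lemma pvScanB_app2 {lines : List String} {n i : Nat} {b0 b1 b2 : List String}
    (hi : i < lines.length)
    (hoj : ¬ PySem.Str.isIn "Universidad de Valladolid OJ" (lines[i]'hi) = true) :
    pvScanB lines (n + 1) i 2 b0 b1 b2 = pvScanB lines n (i + 1) 2 b0 b1 (b2 ++ [lines[i]'hi]) := by
  rw [pvScanB, dif_pos hi]; dsimp only
  rw [if_neg hoj, show pvKwB 2 = none from rfl]

-- phase lemma, state 2 (no end keyword): b0 and b1 pass through; the third buffer collects exactly A's section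
lemma pvPhase2 (lines : List String) :
    ∀ (n m i : Nat) (b0 b1 buf : List String),
      lines.length - i ≤ n → lines.length - i ≤ m →
      (pvScanB lines n i 2 b0 b1 buf).1 = b0 ∧ (pvScanB lines n i 2 b0 b1 buf).2.1 = b1 ∧
      String.ofList (PySem.Chars.strip (pvBufChars (pvScanB lines n i 2 b0 b1 buf).2.2)) =
        (pvReadA lines m i none (pvBufChars buf)).1 := by
  intro n
  induction n with
  | zero =>
    intro m i b0 b1 buf hn hm
    have hi : ¬ i < lines.length := by omega
    rw [pvScanB_done 0 hi, pvReadA_done m hi]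
    exact ⟨rfl, rfl, rfl⟩
  | succ n ih =>
    intro m i b0 b1 buf hn hm
    by_cases hi : i < lines.length
    · obtain ⟨m', rfl⟩ : ∃ m', m = m' + 1 := ⟨m - 1, by omega⟩
      by_cases hoj : PySem.Str.isIn "Universidad de Valladolid OJ" (lines[i]'hi) = true
      · rw [pvScanB_oj hi hoj, pvReadA_oj hi hoj]
        exact ih m' (i + 2) b0 b1 buf (by omega) (by omega)
      · rw [pvScanB_app2 hi hoj, pvReadA_app_none hi hoj]
        have := ih m' (i + 1) b0 b1 (buf ++ [lines[i]'hi]) (by omega) (by omega)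
        rw [pvBufChars_append] at this
        exact this
    · rw [pvScanB_done (n + 1) hi, pvReadA_done m hi]
      exact ⟨rfl, rfl, rfl⟩

-- phase lemma, state 1: B runs the sample-input section and hands over to state 2 at A's resume index
lemma pvPhase1 (lines : List String) :
    ∀ (n m i : Nat) (b0 buf b2 : List String),
      lines.length - i ≤ n → lines.length - i ≤ m →
      ∃ β f, lines.length - (pvReadA lines m i (some "Sample Output") (pvBufChars buf)).2 ≤ f ∧
        pvScanB lines n i 1 b0 buf b2 =
          pvScanB lines f (pvReadA lines m i (some "Sample Output") (pvBufChars buf)).2 2 b0 β b2 ∧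
        String.ofList (PySem.Chars.strip (pvBufChars β)) =
          (pvReadA lines m i (some "Sample Output") (pvBufChars buf)).1 := by
  intro n
  induction n with
  | zero =>
    intro m i b0 buf b2 hn hm
    have hi : ¬ i < lines.length := by omega
    refine ⟨buf, 0, ?_, ?_, ?_⟩ <;> rw [pvReadA_done m hi]
    · omega
    · rw [pvScanB_done 0 hi, pvScanB_done 0 hi]
  | succ n ih =>
    intro m i b0 buf b2 hn hm
    by_cases hi : i < lines.length
    · obtain ⟨m', rfl⟩ : ∃ m', m = m' + 1 := ⟨m - 1, by omega⟩
      by_cases hoj : PySem.Str.isIn "Universidad de Valladolid OJ" (lines[i]'hi) = true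
      · obtain ⟨β, f, hf, h1, h2⟩ := ih m' (i + 2) b0 buf b2 (by omega) (by omega)
        rw [pvReadA_oj hi hoj]
        exact ⟨β, f, hf, by rw [pvScanB_oj hi hoj]; exact h1, h2⟩
      · by_cases hkw : PySem.Str.isIn "Sample Output" (lines[i]'hi) = true
        · refine ⟨buf, n, ?_, ?_, ?_⟩ <;> rw [pvReadA_kw hi hoj hkw]
          · omega
          · rw [pvScanB_kw1 hi hoj hkw]
        · obtain ⟨β, f, hf, h1, h2⟩ := ih m' (i + 1) b0 (buf ++ [lines[i]'hi]) b2 (by omega) (by omega)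
          rw [pvBufChars_append] at hf h1 h2
          rw [pvReadA_app_some hi hoj hkw]
          exact ⟨β, f, hf, by rw [pvScanB_app1 hi hoj hkw]; exact h1, h2⟩
    · refine ⟨buf, 0, ?_, ?_, ?_⟩ <;> rw [pvReadA_done (m) hi]
      · omega
      · rw [pvScanB_done (n + 1) hi, pvScanB_done 0 hi]

-- phase lemma, state 0: B runs the problem-text section and hands over to state 1 at A's resume index
lemma pvPhase0 (lines : List String) :
    ∀ (n m i : Nat) (buf b1 b2 : List String),
      lines.length - i ≤ n → lines.length - i ≤ m →
      ∃ β f, lines.length - (pvReadA lines m i (some "Sample Input") (pvBufChars buf)).2 ≤ f ∧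
        pvScanB lines n i 0 buf b1 b2 =
          pvScanB lines f (pvReadA lines m i (some "Sample Input") (pvBufChars buf)).2 1 β b1 b2 ∧
        String.ofList (PySem.Chars.strip (pvBufChars β)) =
          (pvReadA lines m i (some "Sample Input") (pvBufChars buf)).1 := by
  intro n
  induction n with
  | zero =>
    intro m i buf b1 b2 hn hm
    have hi : ¬ i < lines.length := by omega
    refine ⟨buf, 0, ?_, ?_, ?_⟩ <;> rw [pvReadA_done m hi]
    · omega
    · rw [pvScanB_done 0 hi, pvScanB_done 0 hi]
  | succ n ih =>
    intro m i buf b1 b2 hn hm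
    by_cases hi : i < lines.length
    · obtain ⟨m', rfl⟩ : ∃ m', m = m' + 1 := ⟨m - 1, by omega⟩
      by_cases hoj : PySem.Str.isIn "Universidad de Valladolid OJ" (lines[i]'hi) = true
      · obtain ⟨β, f, hf, h1, h2⟩ := ih m' (i + 2) buf b1 b2 (by omega) (by omega)
        rw [pvReadA_oj hi hoj]
        exact ⟨β, f, hf, by rw [pvScanB_oj hi hoj]; exact h1, h2⟩
      · by_cases hkw : PySem.Str.isIn "Sample Input" (lines[i]'hi) = true
        · refine ⟨buf, n, ?_, ?_, ?_⟩ <;> rw [pvReadA_kw hi hoj hkw]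
          · omega
          · rw [pvScanB_kw0 hi hoj hkw]
        · obtain ⟨β, f, hf, h1, h2⟩ := ih m' (i + 1) (buf ++ [lines[i]'hi]) b1 b2 (by omega) (by omega)
          rw [pvBufChars_append] at hf h1 h2
          rw [pvReadA_app_some hi hoj hkw]
          exact ⟨β, f, hf, by rw [pvScanB_app0 hi hoj hkw]; exact h1, h2⟩
    · refine ⟨buf, 0, ?_, ?_, ?_⟩ <;> rw [pvReadA_done (m) hi]
      · omega
      · rw [pvScanB_done (n + 1) hi, pvScanB_done 0 hi]

-- ===== VERDICT (by name: the statement is the Claim_ definition above) =====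
theorem extract_problem_text_sample_input_output_spec : Claim_equal_extract_problem_text_sample_input_output := by
  intro pc _
  unfold Spec_extract_problem_text_sample_input_output
  unfold extract_problem_text_sample_input_output extract_problem_text_sample_input_output_alt
  set lines := PySem.Str.splitlines pc with hl
  have hbc : pvBufChars ([] : List String) = ([] : List Char) := rfl
  obtain ⟨β0, f1, hf1, e0, s0⟩ :=
    pvPhase0 lines lines.length lines.length 2 [] [] [] (by omega) (by omega)
  obtain ⟨β1, f2, hf2, e1, s1⟩ :=
    pvPhase1 lines f1 lines.length
      (pvReadA lines lines.length 2 (some "Sample Input") (pvBufChars [])).2 β0 [] [] hf1 (by omega)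
  obtain ⟨p1, p2, p3⟩ :=
    pvPhase2 lines f2 lines.length
      (pvReadA lines lines.length
        (pvReadA lines lines.length 2 (some "Sample Input") (pvBufChars [])).2
        (some "Sample Output") (pvBufChars [])).2 β0 β1 [] hf2 (by omega)
  rw [hbc] at e0 s0 e1 s1 p1 p2 p3
  dsimp only
  rw [e0, e1, pvStripJoinB_eq, pvStripJoinB_eq, pvStripJoinB_eq, p1, p2, s0, s1, p3]
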